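-- pv_equiv track=rewrite | github.com/hugoladret/variance-processing-V1 | experimental/analysis/pipeline_photodiode.py | grouper
-- ===== SOURCE A (Python) =====
-- def grouper(iterable, width):
--     '''
--     Black-magic powered iterator from :https://stackoverflow.com/questions/15800895/finding-clusters-of-numbers-in-a-list
--     iterates through the list and generates n:[cluster] elements
--     '''
--     prev = None
--     group = []
--     for item in iterable:
--         if not prev or item - prev <= width:
--             group.append(item)
--         else:
--             yield group
--             group = [item]
--         prev = item
--     if group:
--         yield group
-- ===== SOURCE B (Python) =====
-- def grouper(iterable, width):
--     '''
--     Cluster numbers: collect the split boundaries in one pass over adjacent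
--     pairs, then yield the slices between consecutive boundaries.
--     '''
--     items = list(iterable)
--     if not items:
--         return
--     bounds = [i for i in range(1, len(items)) if items[i] - items[i - 1] > width]
--     for start, end in zip([0] + bounds, bounds + [len(items)]):
--         yield items[start:end]
-- ===== Notes on version B (the rewrite author's own statement) =====
-- stated objective: alternative
-- what changed: Replaced A's accumulate-and-flush generator (prev/group state with yields interleaved) by a build-the-boundaries-then-emit-slices decomposition: one comprehension over adjacent pairs collects the split indices, then slices between consecutive boundaries are yielded; B drops A's falsy 'not prev' guard, so it splits after a 0 where the gap exceeds width.
-- intended difference: On lists containing an adjacent pair (0, b) with b - 0 > width, A's falsy 'not prev' test (meant only for the initial prev=None) suppresses the split after the 0 and A merges the two clusters into one group, while B splits there, which is the intended clustering by gap width. — e.g. on grouper([0, 5], 1): A returns [[0, 5]], B returns [[0], [5]]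
import Mathlib
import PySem

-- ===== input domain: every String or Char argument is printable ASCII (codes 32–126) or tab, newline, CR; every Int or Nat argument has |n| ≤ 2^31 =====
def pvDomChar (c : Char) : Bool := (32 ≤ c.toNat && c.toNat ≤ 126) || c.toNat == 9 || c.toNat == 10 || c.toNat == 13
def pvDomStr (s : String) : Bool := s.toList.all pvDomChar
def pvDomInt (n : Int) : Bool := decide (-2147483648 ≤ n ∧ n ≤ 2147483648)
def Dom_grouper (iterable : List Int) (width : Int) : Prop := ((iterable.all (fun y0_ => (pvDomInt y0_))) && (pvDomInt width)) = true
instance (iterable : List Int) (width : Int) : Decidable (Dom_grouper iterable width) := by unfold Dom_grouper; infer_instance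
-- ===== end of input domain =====

-- B replaces A's accumulate-and-flush generator by a build-the-boundaries-then-emit-slices
-- decomposition (alternative, same cost); B is a generator consumed into a list here, and it
-- splits after a zero where A's falsy `not prev` guard accidentally merges (see D_grouper).


-- ===== PORT A =====
-- loop body: 'if not prev or item - prev <= width: group.append(item) else: yield group; group=[item]'
-- state = (prev, group, out); 'not prev' is true for prev=None and prev=0
def stepA (width : Int) (s : Option Int × List Int × List (List Int)) (item : Int) :
    Option Int × List Int × List (List Int) :=
  match s with
  | (prev, group, out) =>
    match prev with
    | none => (some item, group ++ [item], out)
    | some p =>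
      if p = 0 ∨ item - p ≤ width then (some item, group ++ [item], out)
      else (some item, [item], out ++ [group])

def grouper (iterable : List Int) (width : Int) : List (List Int) :=
  let s := iterable.foldl (stepA width) (none, [], [])
  if s.2.1 ≠ [] then s.2.2 ++ [s.2.1] else s.2.2

-- ===== PORT B =====
-- 'bounds = [i for i in range(1, len(items)) if items[i] - items[i-1] > width]'
-- (indices i-1, i are always in range, so getD is exact), then
-- 'for start, end in zip([0]+bounds, bounds+[len(items)]): yield items[start:end]';
-- the slice items[start:end] with 0 ≤ start ≤ end ≤ len is (drop start).take (end - start).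
def grouper_alt (iterable : List Int) (width : Int) : List (List Int) :=
  if iterable = [] then []
  else
    let n := iterable.length
    let bounds := (List.range' 1 (n - 1)).filter
      (fun i => iterable.getD i 0 - iterable.getD (i - 1) 0 > width)
    ((0 :: bounds).zip (bounds ++ [n])).map
      (fun se => (iterable.drop se.1).take (se.2 - se.1))

-- ===== PRECONDITION & SPEC =====
-- On lists with an adjacent pair (0, b) with b - 0 > width, A's falsy `not prev` guard
-- (meant only for the initial prev=None) suppresses the split after the 0 and A merges the
-- two clusters; B splits there, which is the intended clustering behaviour.
def D_grouper (iterable : List Int) (width : Int) : Prop :=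
  ∃ pr ∈ iterable.zip iterable.tail, pr.1 = 0 ∧ pr.2 - pr.1 > width
instance (iterable : List Int) (width : Int) : Decidable (D_grouper iterable width) := by
  unfold D_grouper; infer_instance

def Spec_grouper (iterable : List Int) (width : Int) (out : List (List Int)) : Prop :=
  ¬ D_grouper iterable width → out = grouper_alt iterable width
instance (iterable : List Int) (width : Int) (out : List (List Int)) : Decidable (Spec_grouper iterable width out) := by unfold Spec_grouper; infer_instance

def pvDiffWitness_grouper : List Int × Int := ([0, 5], 1)
def pvDiffWitnessOut_grouper : (List (List Int)) × (List (List Int)) := ([[0, 5]], [[0], [5]])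

-- ===== CLAIM (what is proved, stated in full; the proofs are below) =====
def Claim_unchanged_grouper : Prop := ∀ (iterable : List Int) (width : Int), Dom_grouper iterable width → Spec_grouper iterable width (grouper iterable width)
def Claim_changed_grouper : Prop := Dom_grouper (pvDiffWitness_grouper.1) (pvDiffWitness_grouper.2) ∧ D_grouper (pvDiffWitness_grouper.1) (pvDiffWitness_grouper.2) ∧ grouper (pvDiffWitness_grouper.1) (pvDiffWitness_grouper.2) = pvDiffWitnessOut_grouper.1 ∧ grouper_alt (pvDiffWitness_grouper.1) (pvDiffWitness_grouper.2) = pvDiffWitnessOut_grouper.2 ∧ pvDiffWitnessOut_grouper.1 ≠ pvDiffWitnessOut_grouper.2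

-- ===== LEMMAS AND PROOFS =====

-- prepend x to the first group (or start one)
def glueCons (x : Int) : List (List Int) → List (List Int)
  | [] => [[x]]
  | h :: t => (x :: h) :: t

-- A's splitter as a recursion: groups of xs given previous element p, first group open
def splitFrom (width p : Int) : List Int → List (List Int)
  | [] => [[]]
  | x :: xs =>
    if p = 0 ∨ x - p ≤ width then glueCons x (splitFrom width x xs)
    else [] :: glueCons x (splitFrom width x xs)

-- the natural splitter: split exactly when the gap exceeds width
def splitN (width p : Int) : List Int → List (List Int)
  | [] => [[]]
  | x :: xs =>
    if x - p ≤ width then glueCons x (splitN width x xs)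
    else [] :: glueCons x (splitN width x xs)

theorem splitFrom_ne_nil (width p : Int) (xs : List Int) : splitFrom width p xs ≠ [] := by
  cases xs with
  | nil => simp [splitFrom]
  | cons x xs =>
    simp only [splitFrom]
    split
    · cases splitFrom width x xs <;> simp [glueCons]
    · simp

-- glue g onto the first group
def glue (g : List Int) : List (List Int) → List (List Int)
  | [] => [g]
  | h :: t => (g ++ h) :: t

def finishA (s : Option Int × List Int × List (List Int)) : List (List Int) :=
  if s.2.1 ≠ [] then s.2.2 ++ [s.2.1] else s.2.2

theorem foldl_stepA_eq (width : Int) (xs : List Int) :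
    ∀ (p : Int) (g : List Int) (out : List (List Int)), g ≠ [] →
      finishA (xs.foldl (stepA width) (some p, g, out)) = out ++ glue g (splitFrom width p xs) := by
  induction xs with
  | nil =>
    intro p g out hg
    simp [finishA, glue, splitFrom, hg]
  | cons x xs ih =>
    intro p g out hg
    simp only [List.foldl_cons, stepA]
    by_cases hc : p = 0 ∨ x - p ≤ width
    · rw [if_pos hc]
      rw [ih x (g ++ [x]) out (by simp)]
      simp only [splitFrom]
      rw [if_pos hc]
      cases hs : splitFrom width x xs with
      | nil => exact absurd hs (splitFrom_ne_nil width x xs)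
      | cons h t => simp [glue, glueCons]
    · rw [if_neg hc]
      rw [ih x [x] (out ++ [g]) (by simp)]
      simp only [splitFrom]
      rw [if_neg hc]
      cases hs : splitFrom width x xs with
      | nil => exact absurd hs (splitFrom_ne_nil width x xs)
      | cons h t => simp [glue, glueCons]

-- outside D_, A's splitter is the natural one (the `p = 0` clause never decides)
theorem splitFrom_eq_splitN (width : Int) (xs : List Int) :
    ∀ p : Int, (∀ pr ∈ (p :: xs).zip xs, ¬(pr.1 = 0 ∧ pr.2 - pr.1 > width)) →
      splitFrom width p xs = splitN width p xs := by
  induction xs with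
  | nil => intro p _; rfl
  | cons x xs ih =>
    intro p hbad
    have hhead := hbad (p, x) (by simp)
    have htail : ∀ pr ∈ (x :: xs).zip xs, ¬(pr.1 = 0 ∧ pr.2 - pr.1 > width) := by
      intro pr hpr
      exact hbad pr (by simp [List.zip_cons_cons]; right; simpa using hpr)
    simp only [splitFrom, splitN]
    rw [ih x htail]
    by_cases hle : x - p ≤ width
    · rw [if_pos (Or.inr hle), if_pos hle]
    · have hp0 : ¬ p = 0 := by
        intro h0; exact hhead ⟨h0, by omega⟩
      rw [if_neg (by tauto), if_neg hle]

-- the slice chain B's zip/map loop produces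
def sliceGo (items : List Int) (s : Nat) : List Nat → List (List Int)
  | [] => [(items.drop s).take (items.length - s)]
  | b :: bs => (items.drop s).take (b - s) :: sliceGo items b bs

theorem zip_map_eq_sliceGo (items : List Int) (f : Nat × Nat → List Int)
    (hf : ∀ se, f se = (items.drop se.1).take (se.2 - se.1)) :
    ∀ (bs : List Nat) (s : Nat),
      ((s :: bs).zip (bs ++ [items.length])).map f = sliceGo items s bs := by
  intro bs
  induction bs with
  | nil => intro s; simp [sliceGo, hf]
  | cons b bs ih =>
    intro s
    simp only [List.cons_append, List.zip_cons_cons, List.map_cons, sliceGo, hf]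
    rw [← ih b]

-- B's bounds for the given items
def boundsOf (width : Int) (items : List Int) : List Nat :=
  (List.range' 1 (items.length - 1)).filter
    (fun i => items.getD i 0 - items.getD (i - 1) 0 > width)

theorem range'_mem_ge (i : Nat) (n : Nat) (h : i ∈ List.range' 1 n 1) : 1 ≤ i := by
  rw [List.mem_range'] at h
  obtain ⟨k, _, hk⟩ := h
  omega

theorem boundsOf_cons (width : Int) (x : Int) (y : Int) (ys : List Int) :
    boundsOf width (x :: y :: ys) =
      (if y - x > width then [1] else []) ++ (boundsOf width (y :: ys)).map (· + 1) := by
  unfold boundsOf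
  have hlen : (x :: y :: ys).length - 1 = ((y :: ys).length - 1) + 1 := by simp
  rw [hlen, List.range'_succ, List.filter_cons]
  have hrange : List.range' (1 + 1) ((y :: ys).length - 1) 1 =
      (List.range' 1 ((y :: ys).length - 1) 1).map (· + 1) := by
    rw [show ((· + 1) : Nat → Nat) = (fun i => 1 + i) from funext fun i => Nat.add_comm i 1,
        List.map_add_range']
  rw [hrange, List.filter_map]
  have e2 : List.filter ((fun i => decide ((x :: y :: ys).getD i 0 - (x :: y :: ys).getD (i - 1) 0 > width)) ∘ (· + 1))
        (List.range' 1 ((y :: ys).length - 1) 1) =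
      List.filter (fun i => decide ((y :: ys).getD i 0 - (y :: ys).getD (i - 1) 0 > width))
        (List.range' 1 ((y :: ys).length - 1) 1) := by
    apply List.filter_congr
    intro i hi
    have h1 : 1 ≤ i := range'_mem_ge i ((y :: ys).length - 1) hi
    simp only [Function.comp]
    have g1 : (x :: y :: ys).getD (i + 1) 0 = (y :: ys).getD i 0 := by simp [List.getD]
    have g2 : (x :: y :: ys).getD (i + 1 - 1) 0 = (y :: ys).getD (i - 1) 0 := by
      have hii : i + 1 - 1 = (i - 1) + 1 := by omega
      rw [hii]; simp [List.getD]
    rw [g1, g2]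
  rw [e2]
  have e1 : (decide ((x :: y :: ys).getD 1 0 - (x :: y :: ys).getD (1 - 1) 0 > width)) = decide (y - x > width) := by
    simp [List.getD]
  rw [e1]
  split
  · next h => rw [if_pos (by simpa using h)]; simp
  · next h => rw [if_neg (by simp at h; omega)]; simp

-- shifting the slice chain across the head element
theorem sliceGo_shift (x : Int) (rest : List Int) :
    ∀ (bs : List Nat) (s : Nat),
      sliceGo (x :: rest) (s + 1) (bs.map (· + 1)) = sliceGo rest s bs := by
  intro bs
  induction bs with
  | nil => intro s; simp [sliceGo]
  | cons b bs ih =>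
    intro s
    simp only [List.map_cons, sliceGo]
    rw [ih b]
    congr 1
    have : b + 1 - (s + 1) = b - s := by omega
    rw [this]; simp

theorem sliceGo_cons_zero (x : Int) (rest : List Int) (bs : List Nat) :
    sliceGo (x :: rest) 0 (bs.map (· + 1)) = glueCons x (sliceGo rest 0 bs) := by
  cases bs with
  | nil => simp [sliceGo, glueCons]
  | cons b bs =>
    simp only [List.map_cons, sliceGo, glueCons]
    rw [sliceGo_shift x rest bs b]
    simp

-- B computes the natural splitter
theorem sliceGo_boundsOf (width : Int) :
    ∀ (xs : List Int) (x : Int),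
      sliceGo (x :: xs) 0 (boundsOf width (x :: xs)) = glueCons x (splitN width x xs) := by
  intro xs
  induction xs with
  | nil =>
    intro x
    simp [boundsOf, sliceGo, splitN, glueCons]
  | cons y ys ih =>
    intro x
    rw [boundsOf_cons width x y ys]
    by_cases hc : y - x > width
    · rw [if_pos hc]
      simp only [List.cons_append, List.nil_append]
      have h1 : (1 : Nat) = 0 + 1 := rfl
      simp only [sliceGo]
      rw [show ((1:Nat) - 0) = 1 by rfl]
      rw [sliceGo_shift x (y :: ys) (boundsOf width (y :: ys)) 0]
      rw [ih y]
      simp only [splitN]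
      rw [if_neg (by omega : ¬ y - x ≤ width)]
      simp [glueCons]
    · rw [if_neg hc]
      simp only [List.nil_append]
      rw [sliceGo_cons_zero x (y :: ys) (boundsOf width (y :: ys))]
      rw [ih y]
      simp only [splitN]
      rw [if_pos (by omega : y - x ≤ width)]

theorem splitN_ne_nil (width p : Int) (xs : List Int) : splitN width p xs ≠ [] := by
  cases xs with
  | nil => simp [splitN]
  | cons x xs =>
    simp only [splitN]
    split
    · cases splitN width x xs <;> simp [glueCons]
    · simp

theorem grouper_alt_cons (width : Int) (x : Int) (xs : List Int) :
    grouper_alt (x :: xs) width = glueCons x (splitN width x xs) := by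
  unfold grouper_alt
  rw [if_neg (by simp : ¬ (x :: xs : List Int) = [])]
  show ((0 :: boundsOf width (x :: xs)).zip (boundsOf width (x :: xs) ++ [(x :: xs).length])).map
      (fun se => ((x :: xs).drop se.1).take (se.2 - se.1)) = glueCons x (splitN width x xs)
  rw [zip_map_eq_sliceGo (x :: xs) _ (fun se => rfl) (boundsOf width (x :: xs)) 0]
  exact sliceGo_boundsOf width xs x

-- ===== VERDICT (by name: the statements are the Claim_ definitions above) =====
theorem grouper_spec : Claim_unchanged_grouper := by
  intro iterable width _
  unfold Spec_grouper
  intro hnD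
  cases iterable with
  | nil => rfl
  | cons x xs =>
    have hbad : ∀ pr ∈ (x :: xs).zip xs, ¬(pr.1 = 0 ∧ pr.2 - pr.1 > width) := by
      intro pr hpr hcon
      exact hnD ⟨pr, by simpa using hpr, hcon⟩
    unfold grouper
    have h0 : (stepA width (none, [], []) x) = (some x, [x], []) := by simp [stepA]
    have hA := foldl_stepA_eq width xs x [x] [] (by simp)
    simp only [List.foldl_cons, h0]
    have hfin : finishA ((xs.foldl (stepA width) (some x, [x], []))) =
        (if (xs.foldl (stepA width) (some x, [x], [])).2.1 ≠ [] then
          (xs.foldl (stepA width) (some x, [x], [])).2.2 ++ [(xs.foldl (stepA width) (some x, [x], [])).2.1]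
        else (xs.foldl (stepA width) (some x, [x], [])).2.2) := rfl
    rw [← hfin, hA, splitFrom_eq_splitN width xs x hbad, grouper_alt_cons width x xs]
    cases hs : splitN width x xs with
    | nil => exact absurd hs (splitN_ne_nil width x xs)
    | cons h t => simp [glue, glueCons]

theorem grouper_changed : Claim_changed_grouper := by unfold Claim_changed_grouper; decide
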